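-- pv_equiv track=rewrite | github.com/caagendaz/cedh_pod_generator_-vibecoded- | generate_pods.py | duplicate_summary
-- ===== SOURCE A (Python) =====
-- def duplicate_summary(players: list[str], pair_counts: dict[tuple[str, str], int]) -> tuple[dict[str, int], dict[str, list[tuple[str, int]]]]:
--     dup_totals = {p: 0 for p in players}
--     dup_detail: dict[str, list[tuple[str, int]]] = {p: [] for p in players}
--
--     for (a, b), count in pair_counts.items():
--         if count > 1:
--             extra = count - 1
--             dup_totals[a] += extra
--             dup_totals[b] += extra
--             dup_detail[a].append((b, count))
--             dup_detail[b].append((a, count))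
--
--     for player in players:
--         dup_detail[player].sort(key=lambda x: (-x[1], x[0]))
--
--     return dup_totals, dup_detail
-- ===== SOURCE B (Python) =====
-- def duplicate_summary(players: list[str], pair_counts: dict[tuple[str, str], int]) -> tuple[dict[str, int], dict[str, list[tuple[str, int]]]]:
--     # Per-player gather: instead of one pass over pairs distributing into shared
--     # dicts, compute each player's row independently from the filtered pair list.
--     items = [(a, b, c) for (a, b), c in pair_counts.items() if c > 1]
--     totals: dict[str, int] = {}
--     detail: dict[str, list[tuple[str, int]]] = {}
--     for p in players:
--         row = [x for (a, b, c) in items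
--                for x in (([(b, c)] if a == p else []) + ([(a, c)] if b == p else []))]
--         row.sort(key=lambda x: (-x[1], x[0]))
--         detail[p] = row
--         totals[p] = sum(c - 1 for _, c in row)
--     return totals, detail
-- ===== Notes on version B (the rewrite author's own statement) =====
-- stated objective: alternative
-- what changed: B computes each player's row independently by a per-player gather over the filtered pair list (nested scan, no dict mutation during the pair pass), instead of A's single pass over pairs that distributes appends and running totals into shared dicts.
import Mathlib
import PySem

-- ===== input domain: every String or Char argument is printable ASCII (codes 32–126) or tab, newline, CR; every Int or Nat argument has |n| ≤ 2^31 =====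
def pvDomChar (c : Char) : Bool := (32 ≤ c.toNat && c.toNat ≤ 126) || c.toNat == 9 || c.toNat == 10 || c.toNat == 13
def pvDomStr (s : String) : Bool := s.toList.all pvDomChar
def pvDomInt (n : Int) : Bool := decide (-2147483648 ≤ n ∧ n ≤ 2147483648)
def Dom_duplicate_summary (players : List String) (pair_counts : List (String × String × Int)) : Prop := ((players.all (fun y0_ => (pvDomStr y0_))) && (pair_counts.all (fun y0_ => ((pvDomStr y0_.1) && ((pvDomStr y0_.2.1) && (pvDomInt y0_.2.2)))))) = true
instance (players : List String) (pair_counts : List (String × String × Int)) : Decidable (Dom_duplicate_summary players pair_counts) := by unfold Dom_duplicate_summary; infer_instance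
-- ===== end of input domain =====

-- B computes each player's row independently by a per-player gather over the filtered pair list
-- (nested scan, no dict mutation during the pair pass) instead of A's single distributing pass
-- (objective: alternative; return-value equivalence only).

-- shared input decoding: the Python argument is a dict keyed by (a, b); the flat triple list is read
-- through its dict representation (duplicate keys overwrite in place, as dict(...) does)
def pvPairs (pair_counts : List (String × String × Int)) : List ((String × String) × Int) :=
  (PySem.Dict.ofList (pair_counts.map (fun t => ((t.1, t.2.1), t.2.2)))).items

-- ===== PORT A =====
-- A's pair-loop body
def pvStepA (st : PySem.Dict String Int × PySem.Dict String (List (String × Int)))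
    (kv : (String × String) × Int) : PySem.Dict String Int × PySem.Dict String (List (String × Int)) :=
  match kv with
  | ((a, b), count) =>
    if count > 1 then
      let extra := count - 1
      (((st.1.modify a 0 (· + extra)).modify b 0 (· + extra)),
       ((st.2.modify a [] (· ++ [(b, count)])).modify b [] (· ++ [(a, count)])))
    else st

def duplicate_summary (players : List String) (pair_counts : List (String × String × Int)) : (List (String × Int)) × (List (String × List (String × Int))) :=
  let dup_totals : PySem.Dict String Int := players.foldl (fun d p => d.insert p 0) PySem.Dict.empty
  let dup_detail : PySem.Dict String (List (String × Int)) := players.foldl (fun d p => d.insert p []) PySem.Dict.empty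
  let st := (pvPairs pair_counts).foldl pvStepA (dup_totals, dup_detail)
  let dup_detail2 := players.foldl (fun d p => d.modify p [] (fun l => PySem.List.sorted2 l (fun x => -x.2) (fun x => x.1) false)) st.2
  (st.1.items, dup_detail2.items)

-- ===== PORT B =====
-- row comprehension: per-pair contribution of (a, b, c) to player p's row
def pvRow (items : List (String × String × Int)) (p : String) : List (String × Int) :=
  items.flatMap (fun t =>
    (if t.1 == p then [(t.2.1, t.2.2)] else []) ++ (if t.2.1 == p then [(t.1, t.2.2)] else []))

-- sum(c - 1 for _, c in row)
def pvSum (l : List (String × Int)) : Int := l.foldl (fun acc x => acc + (x.2 - 1)) 0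

def duplicate_summary_alt (players : List String) (pair_counts : List (String × String × Int)) : (List (String × Int)) × (List (String × List (String × Int))) :=
  let items : List (String × String × Int) :=
    ((pvPairs pair_counts).filter (fun kv => kv.2 > 1)).map (fun kv => (kv.1.1, kv.1.2, kv.2))
  let st := players.foldl
    (fun (st : PySem.Dict String Int × PySem.Dict String (List (String × Int))) p =>
      let row := PySem.List.sorted2 (pvRow items p) (fun x => -x.2) (fun x => x.1) false
      (st.1.insert p (pvSum row), st.2.insert p row))
    (PySem.Dict.empty, PySem.Dict.empty)
  (st.1.items, st.2.items)

-- ===== PRECONDITION & SPEC =====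
-- Pre_ excludes exactly the inputs on which A raises KeyError: a dict entry with count > 1 naming a
-- player that is not in players (entries are read through the dict representation of pair_counts).
def Pre_duplicate_summary (players : List String) (pair_counts : List (String × String × Int)) : Prop :=
  ∀ kv ∈ pvPairs pair_counts, kv.2 > 1 → kv.1.1 ∈ players ∧ kv.1.2 ∈ players
instance (players : List String) (pair_counts : List (String × String × Int)) : Decidable (Pre_duplicate_summary players pair_counts) := by unfold Pre_duplicate_summary; infer_instance

def pvWitness_duplicate_summary : List String × (List (String × String × Int)) :=
  (["alice", "bob", "carol"], [("alice", "bob", 2), ("bob", "carol", 1), ("alice", "alice", 3)])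

def Spec_duplicate_summary (players : List String) (pair_counts : List (String × String × Int)) (out : (List (String × Int)) × (List (String × List (String × Int)))) : Prop := out = duplicate_summary_alt players pair_counts
instance (players : List String) (pair_counts : List (String × String × Int)) (out : (List (String × Int)) × (List (String × List (String × Int)))) : Decidable (Spec_duplicate_summary players pair_counts out) := by unfold Spec_duplicate_summary; infer_instance

-- ===== CLAIM (what is proved, stated in full; the proofs are below) =====
def Claim_equal_duplicate_summary : Prop := ∀ (players : List String) (pair_counts : List (String × String × Int)), Dom_duplicate_summary players pair_counts → Pre_duplicate_summary players pair_counts → Spec_duplicate_summary players pair_counts (duplicate_summary players pair_counts)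

-- ===== LEMMAS AND PROOFS =====

-- Python's sort key (-count, name): lexicographic, via the Lex order on Int × String
def pvSort (l : List (String × Int)) : List (String × Int) :=
  PySem.List.sorted l (fun x => toLex (-x.2, x.1)) false

lemma pvSorted2_eq (l : List (String × Int)) :
    PySem.List.sorted2 l (fun x => -x.2) (fun x => x.1) false = pvSort l := by
  unfold PySem.List.sorted2 pvSort PySem.List.sorted
  simp only [if_neg (by decide : ¬ (false = true))]
  have : (fun (a b : String × Int) => decide (-a.2 < -b.2) || !decide (-b.2 < -a.2) && decide (a.1 < b.1))
      = fun a b => decide ((toLex (-a.2, a.1)) < toLex (-b.2, b.1)) := by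
    funext a b
    rcases lt_trichotomy (-a.2) (-b.2) with h | h | h
    · simp [h, Prod.Lex.lt_iff, not_lt_of_gt h]
    · simp [h, Prod.Lex.lt_iff]
    · simp [h, Prod.Lex.lt_iff, not_lt_of_gt h, ne_of_gt h]
  rw [this]

lemma pvSort_pvSort (l : List (String × Int)) : pvSort (pvSort l) = pvSort l :=
  PySem.List.sorted_sorted l (fun x => toLex (-x.2, x.1))

-- A's detail-only pair step (the second component of pvStepA)
def pvStepD (d : PySem.Dict String (List (String × Int))) (kv : (String × String) × Int) :
    PySem.Dict String (List (String × Int)) :=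
  if kv.2 > 1 then (d.modify kv.1.1 [] (· ++ [(kv.1.2, kv.2)])).modify kv.1.2 [] (· ++ [(kv.1.1, kv.2)])
  else d

-- what the whole pair list contributes to player p's list, in A's append order
def pvContrib (xs : List ((String × String) × Int)) (p : String) : List (String × Int) :=
  xs.flatMap (fun kv =>
    if kv.2 > 1 then
      (if kv.1.1 == p then [(kv.1.2, kv.2)] else []) ++ (if kv.1.2 == p then [(kv.1.1, kv.2)] else [])
    else [])

-- value-map image of a detail dict's items: the totals items A maintains
def pvF (pl : String × List (String × Int)) : String × Int := (pl.1, pvSum pl.2)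

-- the relation A's pair loop maintains between its totals dict and its detail dict
def pvRel (t : PySem.Dict String Int) (d : PySem.Dict String (List (String × Int))) : Prop :=
  t.items = d.items.map pvF

lemma pvSum_append_singleton (l : List (String × Int)) (x : String × Int) :
    pvSum (l ++ [x]) = pvSum l + (x.2 - 1) := by
  simp [pvSum, List.foldl_append]

lemma pvSum_eq_sum_map (l : List (String × Int)) :
    pvSum l = (l.map (fun x => x.2 - 1)).sum := by
  simp [pvSum, List.sum_eq_foldl, List.foldl_map]

lemma pvSum_sorted (l : List (String × Int)) :
    pvSum (pvSort l) = pvSum l := by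
  rw [pvSum_eq_sum_map, pvSum_eq_sum_map]
  exact List.Perm.sum_eq (List.Perm.map _ (PySem.List.sorted_perm l (fun x => toLex (-x.2, x.1)) false))

lemma pvRel_keys {t : PySem.Dict String Int} {d : PySem.Dict String (List (String × Int))}
    (h : pvRel t d) : t.keys = d.keys := by
  have h' : t.items = d.items.map pvF := h
  simp only [PySem.Dict.keys]
  rw [h', List.map_map]
  rfl

lemma pvRel_insert {t : PySem.Dict String Int} {d : PySem.Dict String (List (String × Int))}
    (h : pvRel t d) (p : String) (v : List (String × Int)) :
    pvRel (t.insert p (pvSum v)) (d.insert p v) := by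
  unfold pvRel
  have hc : t.contains p = d.contains p := by
    rcases hcd : d.contains p with _ | _
    · rcases hct : t.contains p with _ | _
      · rfl
      · exact absurd ((PySem.Dict.contains_iff_mem_keys d p).2
          (by rw [← pvRel_keys h]; exact (PySem.Dict.contains_iff_mem_keys t p).1 hct)) (by simp [hcd])
    · exact (PySem.Dict.contains_iff_mem_keys t p).2
        (by rw [pvRel_keys h]; exact (PySem.Dict.contains_iff_mem_keys d p).1 hcd)
  have h' : t.items = d.items.map pvF := h
  rw [PySem.Dict.items_insert, PySem.Dict.items_insert, hc]
  by_cases hcd : d.contains p = true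
  · rw [if_pos hcd, if_pos hcd, h', List.map_map, List.map_map]
    apply List.map_congr_left
    intro pl _
    by_cases hp : pl.1 = p <;> simp [pvF, hp]
  · rw [if_neg hcd, if_neg hcd, h', List.map_append]
    rfl

-- get? through a value-mapped literal dict
lemma get?_mk_map_val {β : Type} (F : List (String × Int) → β) :
    ∀ (l : List (String × List (String × Int))) (k : String),
    (PySem.Dict.mk (l.map (fun pl => (pl.1, F pl.2)))).get? k = ((PySem.Dict.mk l).get? k).map F := by
  intro l
  induction l with
  | nil => intro k; rfl
  | cons pl rest ih =>
    intro k
    simp only [List.map_cons]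
    rw [PySem.Dict.get?_mk_cons, PySem.Dict.get?_mk_cons]
    by_cases hp : (pl.1 == k) = true
    · simp [hp]
    · simp [hp, ih k]

lemma pvRel_getD {t : PySem.Dict String Int} {d : PySem.Dict String (List (String × Int))}
    (h : pvRel t d) (p : String) : t.getD p 0 = pvSum (d.getD p []) := by
  have ht : t = PySem.Dict.mk (d.items.map pvF) := PySem.Dict.ext h
  have : t.get? p = (d.get? p).map pvSum := by
    rw [ht]
    have := get?_mk_map_val pvSum d.items p
    simpa [pvF] using this
  rw [PySem.Dict.getD_eq_get?_getD, PySem.Dict.getD_eq_get?_getD, this]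
  rcases d.get? p with _ | v
  · rfl
  · rfl

lemma pvStepA_snd (st : PySem.Dict String Int × PySem.Dict String (List (String × Int)))
    (kv : (String × String) × Int) : (pvStepA st kv).2 = pvStepD st.2 kv := by
  rcases kv with ⟨⟨a, b⟩, c⟩
  by_cases hc : c > 1 <;> simp [pvStepA, pvStepD, hc]

lemma pvFoldA_snd (xs : List ((String × String) × Int)) :
    ∀ st : PySem.Dict String Int × PySem.Dict String (List (String × Int)),
    (xs.foldl pvStepA st).2 = xs.foldl pvStepD st.2 := by
  induction xs with
  | nil => intro st; rfl
  | cons kv rest ih => intro st; rw [List.foldl_cons, List.foldl_cons, ih, pvStepA_snd]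

lemma pvStepA_rel {t : PySem.Dict String Int} {d : PySem.Dict String (List (String × Int))}
    (h : pvRel t d) (kv : (String × String) × Int) :
    pvRel (pvStepA (t, d) kv).1 (pvStepA (t, d) kv).2 := by
  rcases kv with ⟨⟨a, b⟩, c⟩
  by_cases hc : c > 1
  · simp only [pvStepA, hc, if_pos]
    have h1 : pvRel (t.insert a (pvSum (d.getD a [] ++ [(b, c)]))) (d.insert a (d.getD a [] ++ [(b, c)])) :=
      pvRel_insert h a _
    have e1 : t.getD a 0 + (c - 1) = pvSum (d.getD a [] ++ [(b, c)]) := by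
      rw [pvRel_getD h a, pvSum_append_singleton]
    have h2 := pvRel_insert h1 b ((d.insert a (d.getD a [] ++ [(b, c)])).getD b [] ++ [(a, c)])
    have e2 : (t.insert a (pvSum (d.getD a [] ++ [(b, c)]))).getD b 0 + (c - 1)
        = pvSum ((d.insert a (d.getD a [] ++ [(b, c)])).getD b [] ++ [(a, c)]) := by
      rw [pvRel_getD h1 b, pvSum_append_singleton]
    show pvRel ((t.modify a 0 (· + (c - 1))).modify b 0 (· + (c - 1)))
        ((d.modify a [] (· ++ [(b, c)])).modify b [] (· ++ [(a, c)]))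
    have ma : t.modify a 0 (· + (c - 1)) = t.insert a (t.getD a 0 + (c - 1)) := rfl
    rw [ma, e1]
    have mb : (t.insert a (pvSum (d.getD a [] ++ [(b, c)]))).modify b 0 (· + (c - 1))
        = (t.insert a (pvSum (d.getD a [] ++ [(b, c)]))).insert b
            ((t.insert a (pvSum (d.getD a [] ++ [(b, c)]))).getD b 0 + (c - 1)) := rfl
    rw [mb, e2]
    exact h2
  · simpa [pvStepA, hc] using h

lemma pvFoldA_rel (xs : List ((String × String) × Int)) :
    ∀ (t : PySem.Dict String Int) (d : PySem.Dict String (List (String × Int))), pvRel t d →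
    pvRel (xs.foldl pvStepA (t, d)).1 (xs.foldl pvStepA (t, d)).2 := by
  induction xs with
  | nil => intro t d h; exact h
  | cons kv rest ih =>
    intro t d h
    rw [List.foldl_cons]
    have := pvStepA_rel h kv
    rcases he : pvStepA (t, d) kv with ⟨t', d'⟩
    rw [he] at this
    exact ih t' d' this

lemma pvRel_init (players : List String) :
    pvRel (players.foldl (fun d p => d.insert p 0) PySem.Dict.empty)
          (players.foldl (fun d p => d.insert p []) PySem.Dict.empty) := by
  suffices h : ∀ (ps : List String) t d, pvRel t d →
      pvRel (ps.foldl (fun d p => d.insert p (0 : Int)) t)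
            (ps.foldl (fun d p => d.insert p ([] : List (String × Int))) d) from
    h players _ _ rfl
  intro ps
  induction ps with
  | nil => intro t d h; exact h
  | cons p rest ih =>
    intro t d h
    rw [List.foldl_cons, List.foldl_cons]
    exact ih _ _ (pvRel_insert h p [])

-- the (deduplicated) key list both result dicts carry
def pvKs (players : List String) : List String := PySem.Set.update ([] : PySem.Set String) players

lemma mem_pvKs (players : List String) (k : String) : k ∈ pvKs players ↔ k ∈ players := by
  unfold pvKs
  rw [PySem.Set.mem_update]
  simp

lemma pvKeys_init (players : List String) :
    (players.foldl (fun d p => d.insert p ([] : List (String × Int))) PySem.Dict.empty).keys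
      = pvKs players := by
  rw [PySem.Dict.keys_foldl_insert players (fun _ _ => []) PySem.Dict.empty, PySem.Dict.keys_empty]
  rfl

lemma keys_modify_mem {ν : Type} (d : PySem.Dict String ν) (k : String) (dflt : ν) (f : ν → ν)
    (h : k ∈ d.keys) : (d.modify k dflt f).keys = d.keys := by
  have e : d.modify k dflt f = d.insert k (f (d.getD k dflt)) := rfl
  rw [e, PySem.Dict.keys_insert_of_contains _ _ ((PySem.Dict.contains_iff_mem_keys d k).2 h)]

lemma pvKeys_stepD {d : PySem.Dict String (List (String × Int))} {players : List String}
    (hk : ∀ k, k ∈ players → k ∈ d.keys) (kv : (String × String) × Int)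
    (hkv : kv.2 > 1 → kv.1.1 ∈ players ∧ kv.1.2 ∈ players) :
    (pvStepD d kv).keys = d.keys := by
  by_cases hc : kv.2 > 1
  · have ha := hk _ (hkv hc).1
    have hb := hk _ (hkv hc).2
    simp only [pvStepD, hc, if_pos]
    rw [keys_modify_mem _ _ _ _ (by rw [keys_modify_mem _ _ _ _ ha]; exact hb),
      keys_modify_mem _ _ _ _ ha]
  · simp [pvStepD, hc]

lemma pvKeys_foldD (players : List String) (xs : List ((String × String) × Int))
    (hxs : ∀ kv ∈ xs, kv.2 > 1 → kv.1.1 ∈ players ∧ kv.1.2 ∈ players) :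
    ∀ (d : PySem.Dict String (List (String × Int))), (∀ k, k ∈ players → k ∈ d.keys) →
    (xs.foldl pvStepD d).keys = d.keys := by
  induction xs with
  | nil => intro d _; rfl
  | cons kv rest ih =>
    intro d hk
    rw [List.foldl_cons]
    have hstep := pvKeys_stepD hk kv (hxs kv (by simp))
    rw [ih (fun kv' h' => hxs kv' (by simp [h'])) _ (fun k hkp => by rw [hstep]; exact hk k hkp), hstep]

-- getD through A's detail pair fold: initial list ++ total contribution, for every key
lemma getD_stepD (d : PySem.Dict String (List (String × Int))) (kv : (String × String) × Int)
    (p : String) :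
    (pvStepD d kv).getD p []
      = d.getD p [] ++ (if kv.2 > 1 then
          (if kv.1.1 == p then [(kv.1.2, kv.2)] else []) ++ (if kv.1.2 == p then [(kv.1.1, kv.2)] else [])
        else []) := by
  by_cases hc : kv.2 > 1
  · simp only [pvStepD, hc, if_pos]
    have m1 : d.modify kv.1.1 [] (· ++ [(kv.1.2, kv.2)])
        = d.insert kv.1.1 (d.getD kv.1.1 [] ++ [(kv.1.2, kv.2)]) := rfl
    have m2 : ∀ d' : PySem.Dict String (List (String × Int)),
        d'.modify kv.1.2 [] (· ++ [(kv.1.1, kv.2)])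
          = d'.insert kv.1.2 (d'.getD kv.1.2 [] ++ [(kv.1.1, kv.2)]) := fun _ => rfl
    rw [m1, m2]
    by_cases ha : kv.1.1 = p <;> by_cases hb : kv.1.2 = p
    · simp [ha, hb]
    · have hb' : ¬ p = kv.1.2 := fun h => hb h.symm
      simp [PySem.Dict.getD_insert, ha, hb, hb']
    · have ha' : ¬ p = kv.1.1 := fun h => ha h.symm
      simp [PySem.Dict.getD_insert, ha, hb, ha']
    · have ha' : ¬ p = kv.1.1 := fun h => ha h.symm
      have hb' : ¬ p = kv.1.2 := fun h => hb h.symm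
      simp [PySem.Dict.getD_insert, ha, hb, ha', hb']
  · simp [pvStepD, hc]

lemma getD_foldD (xs : List ((String × String) × Int)) :
    ∀ (d : PySem.Dict String (List (String × Int))) (p : String),
    (xs.foldl pvStepD d).getD p [] = d.getD p [] ++ pvContrib xs p := by
  induction xs with
  | nil => intro d p; simp [pvContrib]
  | cons kv rest ih =>
    intro d p
    rw [List.foldl_cons, ih, getD_stepD]
    unfold pvContrib
    rw [List.flatMap_cons, List.append_assoc]

-- B's row over the filtered-and-mapped items equals the total contribution
lemma pvRow_eq_contrib (xs : List ((String × String) × Int)) (p : String) :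
    pvRow ((xs.filter (fun kv => kv.2 > 1)).map (fun kv => (kv.1.1, kv.1.2, kv.2))) p
      = pvContrib xs p := by
  induction xs with
  | nil => rfl
  | cons kv rest ih =>
    unfold pvContrib
    rw [List.flatMap_cons]
    by_cases hc : kv.2 > 1
    · rw [List.filter_cons_of_pos (by simpa using hc), List.map_cons]
      unfold pvRow
      rw [List.flatMap_cons, if_pos hc]
      exact congrArg _ ih
    · rw [List.filter_cons_of_neg (by simpa using hc), if_neg hc, List.nil_append]
      exact ih

-- B's pair fold over players splits into two independent insert folds
lemma pvFoldB_split (H1 : String → Int) (H2 : String → List (String × Int)) :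
    ∀ (ps : List String) (st : PySem.Dict String Int × PySem.Dict String (List (String × Int))),
    ps.foldl (fun st p => (st.1.insert p (H1 p), st.2.insert p (H2 p))) st
      = (ps.foldl (fun t p => t.insert p (H1 p)) st.1, ps.foldl (fun d p => d.insert p (H2 p)) st.2) := by
  intro ps
  induction ps with
  | nil => intro st; rfl
  | cons p rest ih => intro st; rw [List.foldl_cons, ih]; rfl

-- a fold inserting a key-determined value: final lookup
lemma getD_foldl_insert_fun {ν : Type} (H : String → ν) (d0 : ν) :
    ∀ (ps : List String) (t : PySem.Dict String ν) (k : String),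
    (ps.foldl (fun d p => d.insert p (H p)) t).getD k d0 = if k ∈ ps then H k else t.getD k d0 := by
  intro ps
  induction ps with
  | nil => intro t k; simp
  | cons p rest ih =>
    intro t k
    rw [List.foldl_cons, ih]
    by_cases hk : k ∈ rest
    · simp [hk]
    · by_cases hp : k = p <;> simp [hk, hp, PySem.Dict.getD_insert]

-- the in-place sorting fold: final lookup (idempotence handles duplicate player names)
lemma getD_foldl_sort :
    ∀ (ps : List String) (d : PySem.Dict String (List (String × Int))) (k : String),
    (ps.foldl (fun d p => d.modify p [] (fun l => pvSort l)) d).getD k []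
      = if k ∈ ps then pvSort (d.getD k []) else d.getD k [] := by
  intro ps
  induction ps with
  | nil => intro d k; simp
  | cons p rest ih =>
    intro d k
    rw [List.foldl_cons, ih]
    have m : (d.modify p [] fun l => pvSort l) = d.insert p (pvSort (d.getD p [])) := rfl
    rw [m]
    by_cases hp : k = p
    · subst hp
      by_cases hk : k ∈ rest
      · simp [hk, pvSort_pvSort]
      · simp [hk]
    · by_cases hk : k ∈ rest <;> simp [hk, hp, PySem.Dict.getD_insert]

lemma keys_foldl_sort (ps : List String) (d : PySem.Dict String (List (String × Int))) :
    (ps.foldl (fun d p => d.modify p [] (fun l => pvSort l)) d).keys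
      = PySem.Set.update d.keys ps := by
  have : (fun (d : PySem.Dict String (List (String × Int))) (p : String) =>
      d.modify p [] (fun l => pvSort l))
      = fun d p => d.insert p (pvSort (d.getD p [])) := rfl
  rw [this, PySem.Dict.keys_foldl_insert]

lemma set_update_of_subset (s : PySem.Set String) :
    ∀ (l : List String), (∀ x ∈ l, x ∈ s) → PySem.Set.update s l = s := by
  intro l
  induction l with
  | nil => intro _; rfl
  | cons x rest ih =>
    intro h
    have hx : PySem.Set.add s x = s := by
      unfold PySem.Set.add
      simp [List.contains_eq_mem, h x (by simp)]
    show PySem.Set.update (PySem.Set.add s x) rest = s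
    rw [hx]
    exact ih (fun y hy => h y (by simp [hy]))

lemma nodup_pvKs (players : List String) :
    (players.foldl (fun d p => d.insert p ([] : List (String × Int))) PySem.Dict.empty).keys.Nodup :=
  PySem.Dict.nodup_keys_foldl_insert players _ _ PySem.Dict.nodup_keys_empty

-- ===== VERDICT (by name: the statement is the Claim_ definition above) =====
theorem duplicate_summary_spec : Claim_equal_duplicate_summary := by
  intro players pair_counts _ hpre
  unfold Spec_duplicate_summary duplicate_summary duplicate_summary_alt
  set P := pvPairs pair_counts with hP
  simp only [pvSorted2_eq]
  set d0 := players.foldl (fun d p => d.insert p ([] : List (String × Int))) PySem.Dict.empty with hd0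
  set t0 := players.foldl (fun d p => d.insert p (0 : Int)) PySem.Dict.empty with ht0
  set items := ((P.filter (fun kv => kv.2 > 1)).map (fun kv => (kv.1.1, kv.1.2, kv.2))) with hitems
  -- A's detail dict after the pair loop
  set detail1 := P.foldl pvStepD d0 with hdetail1
  have hsnd : (P.foldl pvStepA (t0, d0)).2 = detail1 := pvFoldA_snd P (t0, d0)
  have hrel : pvRel (P.foldl pvStepA (t0, d0)).1 detail1 := by
    rw [← hsnd]; exact pvFoldA_rel P t0 d0 (pvRel_init players)
  have hkeys0 : d0.keys = pvKs players := pvKeys_init players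
  have hkeys1 : detail1.keys = pvKs players := by
    rw [hdetail1, pvKeys_foldD players P hpre d0
      (fun k hk => by rw [hkeys0]; exact (mem_pvKs players k).2 hk), hkeys0]
  have hnd1 : detail1.keys.Nodup := by rw [hkeys1, ← hkeys0]; exact nodup_pvKs players
  -- A's per-player unsorted list is the total contribution
  have hgd1 : ∀ k, detail1.getD k [] = pvContrib P k := by
    intro k
    rw [hdetail1, getD_foldD, hd0, getD_foldl_insert_fun]
    by_cases hk : k ∈ players <;> simp [hk, PySem.Dict.getD_empty]
  -- B's row equals the contribution
  have hrow : ∀ k, pvRow items k = pvContrib P k := fun k => pvRow_eq_contrib P k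
  -- B's fold split into totals / detail folds
  rw [pvFoldB_split (fun p => pvSum (pvSort (pvRow items p))) (fun p => pvSort (pvRow items p))
    players (PySem.Dict.empty, PySem.Dict.empty)]
  refine Prod.ext ?_ ?_
  · -- totals
    show (P.foldl pvStepA (t0, d0)).1.items
        = (players.foldl (fun t p => t.insert p (pvSum (pvSort (pvRow items p)))) PySem.Dict.empty).items
    set tB := players.foldl (fun t p => t.insert p (pvSum (pvSort (pvRow items p)))) PySem.Dict.empty with htB
    have hkeysB : tB.keys = pvKs players := by
      rw [htB, PySem.Dict.keys_foldl_insert players (fun _ p => pvSum (pvSort (pvRow items p)))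
        PySem.Dict.empty, PySem.Dict.keys_empty]
      rfl
    have hndB : tB.keys.Nodup := by
      rw [htB]; exact PySem.Dict.nodup_keys_foldl_insert players _ _ PySem.Dict.nodup_keys_empty
    have hB : tB.items = (pvKs players).map (fun k => (k, tB.getD k 0)) := by
      rw [← hkeysB]; exact PySem.Dict.items_eq_map_keys tB hndB 0
    have hA : (P.foldl pvStepA (t0, d0)).1.items
        = (pvKs players).map (fun k => (k, pvSum (detail1.getD k []))) := by
      rw [hrel, PySem.Dict.items_eq_map_keys detail1 hnd1 [], hkeys1, List.map_map]
      apply List.map_congr_left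
      intro k _
      rfl
    rw [hA, hB]
    apply List.map_congr_left
    intro k hk
    have hkp : k ∈ players := (mem_pvKs players k).1 hk
    rw [htB, getD_foldl_insert_fun, if_pos hkp, pvSum_sorted, hrow k, hgd1 k]
  · -- details
    show (players.foldl (fun d p => d.modify p [] (fun l => pvSort l))
        (P.foldl pvStepA (t0, d0)).2).items
      = (players.foldl (fun d p => d.insert p (pvSort (pvRow items p))) PySem.Dict.empty).items
    rw [hsnd]
    set d2 := players.foldl (fun d p => d.modify p [] (fun l => pvSort l)) detail1 with hd2
    set dB := players.foldl (fun d p => d.insert p (pvSort (pvRow items p))) PySem.Dict.empty with hdB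
    have hkeys2 : d2.keys = pvKs players := by
      rw [hd2, keys_foldl_sort, hkeys1]
      exact set_update_of_subset (pvKs players) players (fun x hx => (mem_pvKs players x).2 hx)
    have hnd2 : d2.keys.Nodup := by rw [hkeys2, ← hkeys1]; exact hnd1
    have hkeysB : dB.keys = pvKs players := by
      rw [hdB, PySem.Dict.keys_foldl_insert players (fun _ p => pvSort (pvRow items p))
        PySem.Dict.empty, PySem.Dict.keys_empty]
      rfl
    have hndB : dB.keys.Nodup := by
      rw [hdB]; exact PySem.Dict.nodup_keys_foldl_insert players _ _ PySem.Dict.nodup_keys_empty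
    rw [PySem.Dict.items_eq_map_keys d2 hnd2 [], PySem.Dict.items_eq_map_keys dB hndB [],
      hkeys2, hkeysB]
    apply List.map_congr_left
    intro k hk
    have hkp : k ∈ players := (mem_pvKs players k).1 hk
    rw [hd2, getD_foldl_sort, if_pos hkp, hdB, getD_foldl_insert_fun, if_pos hkp, hrow k, hgd1 k]
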